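-- pv_equiv track=rewrite | github.com/kevinczhong/whiteboard-practice | altCaps.py | altCaps
-- ===== SOURCE A (Python) =====
-- def altCaps(string):
--     altString = ""
--     for letter in range(len(string)):
--         if letter % 2 != 0:
--             altString += string[letter].upper()
--         else:
--             altString += string[letter]
--     return altString
-- ===== SOURCE B (Python) =====
-- def altCaps(string):
--     out = []
--     it = iter(string)
--     for even in it:
--         out.append(even)
--         odd = next(it, None)
--         if odd is not None:
--             out.append(odd.upper())
--     return "".join(out)
-- ===== Notes on version B (the rewrite author's own statement) =====
-- stated objective: idiomatic
-- what changed: Replaces the index loop with a per-index modulo test and string concatenation by a single pairwise pass that consumes the characters two at a time (plain char, then uppercased char) into a list joined at the end.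
import Mathlib
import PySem

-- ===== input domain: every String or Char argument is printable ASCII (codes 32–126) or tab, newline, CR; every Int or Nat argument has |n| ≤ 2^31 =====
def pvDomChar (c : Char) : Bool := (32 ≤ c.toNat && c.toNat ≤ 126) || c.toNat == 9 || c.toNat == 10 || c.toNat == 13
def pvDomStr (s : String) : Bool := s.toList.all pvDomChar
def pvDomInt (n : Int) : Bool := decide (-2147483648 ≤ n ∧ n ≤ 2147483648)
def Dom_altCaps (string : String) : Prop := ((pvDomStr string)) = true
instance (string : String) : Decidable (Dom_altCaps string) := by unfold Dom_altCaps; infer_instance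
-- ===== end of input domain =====

-- B consumes the characters pairwise (plain, then uppercased) instead of testing each index modulo 2; more idiomatic, same values.

-- ===== PORT A =====
-- for letter in range(len(string)): if letter % 2 != 0: acc += string[letter].upper() else: acc += string[letter]
def altCaps (string : String) : String :=
  String.ofList
    ((PySem.List.pyRange 0 string.toList.length 1).foldl
      (fun acc letter =>
        if PySem.Int.mod letter 2 ≠ 0 then
          acc ++ [PySem.Chars.upperChar (PySem.List.pyGetD string.toList letter ' ')]
        else
          acc ++ [PySem.List.pyGetD string.toList letter ' ']) [])

-- ===== PORT B =====
-- the for-loop over the iterator: take the next char as-is, then (if present) the one after, uppercased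
def altCapsPairs : List Char → List Char
  | [] => []
  | [e] => [e]
  | e :: o :: t => e :: PySem.Chars.upperChar o :: altCapsPairs t

def altCaps_alt (string : String) : String :=
  String.ofList (altCapsPairs string.toList)

-- ===== PRECONDITION & SPEC =====
def Spec_altCaps (string : String) (out : String) : Prop := out = altCaps_alt string
instance (string : String) (out : String) : Decidable (Spec_altCaps string out) := by unfold Spec_altCaps; infer_instance

-- ===== CLAIM (what is proved, stated in full; the proofs are below) =====
def Claim_equal_altCaps : Prop := ∀ (string : String), Dom_altCaps string → Spec_altCaps string (altCaps string)

-- ===== LEMMAS AND PROOFS =====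

-- the body of A's loop, with the if pulled inside the append
theorem altCaps_body_eq (xs : List Char) (acc : List Char) (i : Int) :
    (if PySem.Int.mod i 2 ≠ 0 then
        acc ++ [PySem.Chars.upperChar (PySem.List.pyGetD xs i ' ')]
      else acc ++ [PySem.List.pyGetD xs i ' ']) =
    acc ++ [if PySem.Int.mod i 2 ≠ 0 then
        PySem.Chars.upperChar (PySem.List.pyGetD xs i ' ')
      else PySem.List.pyGetD xs i ' '] := by
  split <;> rfl

-- the indexed-enumerate form of A equals the pairwise pass, for any even start index
theorem enum_map_eq_pairs (t : List Char) : ∀ s : Int, s % 2 = 0 →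
    (PySem.List.enumerate t s).map
      (fun p => if PySem.Int.mod p.1 2 ≠ 0 then PySem.Chars.upperChar p.2 else p.2) =
    altCapsPairs t := by
  induction t using altCapsPairs.induct with
  | case1 =>
      intro s _; simp [PySem.List.enumerate_nil, altCapsPairs]
  | case2 e =>
      intro s hs
      simp [PySem.List.enumerate_cons, PySem.List.enumerate_nil, altCapsPairs]
      intro h'; omega
  | case3 e o t ih =>
      intro s hs
      simp [PySem.List.enumerate_cons, altCapsPairs]
      refine ⟨by intro h'; omega, by intro h'; omega, ?_⟩
      simpa using ih (s + 1 + 1) (by omega)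

-- ===== VERDICT (by name: the statement is the Claim_ definition above) =====
theorem altCaps_spec : Claim_equal_altCaps := by
  intro s _
  unfold Spec_altCaps altCaps altCaps_alt
  congr 1
  calc
    (PySem.List.pyRange 0 s.toList.length 1).foldl
        (fun acc letter =>
          if PySem.Int.mod letter 2 ≠ 0 then
            acc ++ [PySem.Chars.upperChar (PySem.List.pyGetD s.toList letter ' ')]
          else acc ++ [PySem.List.pyGetD s.toList letter ' ']) []
      = (PySem.List.pyRange 0 s.toList.length 1).map
          (fun i => if PySem.Int.mod i 2 ≠ 0 then
              PySem.Chars.upperChar (PySem.List.pyGetD s.toList i ' ')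
            else PySem.List.pyGetD s.toList i ' ') := by
        simp only [altCaps_body_eq]
        simpa using PySem.List.foldl_append_singleton_eq_map
          (f := fun i => if PySem.Int.mod i 2 ≠ 0 then
              PySem.Chars.upperChar (PySem.List.pyGetD s.toList i ' ')
            else PySem.List.pyGetD s.toList i ' ')
          (l := PySem.List.pyRange 0 s.toList.length 1) (acc := [])
    _ = (PySem.List.enumerate s.toList 0).map
          (fun p => if PySem.Int.mod p.1 2 ≠ 0 then PySem.Chars.upperChar p.2 else p.2) := by
        rw [PySem.List.enumerate_eq_map_pyRange (d := ' '), List.map_map]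
        rfl
    _ = altCapsPairs s.toList := enum_map_eq_pairs s.toList 0 (by decide)
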